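-- pv_equiv track=rewrite | github.com/pewapplepie/GameOfLifeSimulator | lifeLogic.py | rotate_pattern
-- ===== SOURCE A (Python) =====
-- def rotate_pattern(pattern, rotation):
--     if rotation == 0:
--         return pattern
--     elif rotation == 90:
--         return [(c, -r) for r, c in pattern]
--     elif rotation == 180:
--         return [(-r, -c) for r, c in pattern]
--     elif rotation == 270:
--         return [(-c, r) for r, c in pattern]
-- ===== SOURCE B (Python) =====
-- def rotate_pattern(pattern, rotation):
--     if rotation not in (0, 90, 180, 270):
--         return None
--     result = pattern
--     for _ in range(rotation // 90):
--         result = [(c, -r) for r, c in result]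
--     return result
-- ===== Notes on version B (the rewrite author's own statement) =====
-- stated objective: simpler
-- what changed: Replaces the four-way branch with separate comprehensions by one quarter-turn map applied rotation//90 times in a loop.
import Mathlib
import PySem

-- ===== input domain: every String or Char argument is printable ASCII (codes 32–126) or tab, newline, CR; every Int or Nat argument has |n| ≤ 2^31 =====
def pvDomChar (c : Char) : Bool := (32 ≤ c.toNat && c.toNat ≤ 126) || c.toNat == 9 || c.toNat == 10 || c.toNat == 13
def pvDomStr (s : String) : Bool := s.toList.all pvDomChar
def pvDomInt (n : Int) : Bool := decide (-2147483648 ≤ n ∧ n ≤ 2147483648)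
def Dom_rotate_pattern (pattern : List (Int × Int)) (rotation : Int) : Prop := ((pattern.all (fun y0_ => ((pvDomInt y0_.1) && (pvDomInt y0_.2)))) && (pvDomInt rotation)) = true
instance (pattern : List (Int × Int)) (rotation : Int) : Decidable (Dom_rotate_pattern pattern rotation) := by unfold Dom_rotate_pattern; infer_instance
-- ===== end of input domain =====

-- B replaces A's four hand-written comprehensions by one quarter-turn map iterated rotation//90 times (objective: simpler).

-- ===== PORT A =====
def rotate_pattern (pattern : List (Int × Int)) (rotation : Int) : Option (List (Int × Int)) :=
  if rotation = 0 then some pattern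
  else if rotation = 90 then some (pattern.map (fun rc => (rc.2, -rc.1)))
  else if rotation = 180 then some (pattern.map (fun rc => (-rc.1, -rc.2)))
  else if rotation = 270 then some (pattern.map (fun rc => (-rc.2, rc.1)))
  else none   -- Python falls off the end: returns None

-- ===== PORT B =====
-- one 90° quarter-turn
def pvQuarter (l : List (Int × Int)) : List (Int × Int) := l.map (fun rc => (rc.2, -rc.1))

def rotate_pattern_alt (pattern : List (Int × Int)) (rotation : Int) : Option (List (Int × Int)) :=
  if rotation = 0 ∨ rotation = 90 ∨ rotation = 180 ∨ rotation = 270 then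
    some (pvQuarter^[(PySem.Int.floordiv rotation 90).toNat] pattern)
  else none

-- ===== PRECONDITION & SPEC =====
def Spec_rotate_pattern (pattern : List (Int × Int)) (rotation : Int) (out : Option (List (Int × Int))) : Prop := out = rotate_pattern_alt pattern rotation
instance (pattern : List (Int × Int)) (rotation : Int) (out : Option (List (Int × Int))) : Decidable (Spec_rotate_pattern pattern rotation out) := by unfold Spec_rotate_pattern; infer_instance

-- ===== CLAIM (what is proved, stated in full; the proofs are below) =====
def Claim_equal_rotate_pattern : Prop := ∀ (pattern : List (Int × Int)) (rotation : Int), Dom_rotate_pattern pattern rotation → Spec_rotate_pattern pattern rotation (rotate_pattern pattern rotation)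

-- ===== LEMMAS AND PROOFS =====
theorem pvQuarter_two (l : List (Int × Int)) :
    pvQuarter (pvQuarter l) = l.map (fun rc => (-rc.1, -rc.2)) := by
  simp [pvQuarter, List.map_map, Function.comp]

theorem pvQuarter_three (l : List (Int × Int)) :
    pvQuarter (pvQuarter (pvQuarter l)) = l.map (fun rc => (-rc.2, rc.1)) := by
  simp [pvQuarter, List.map_map, Function.comp]

-- ===== VERDICT (by name: the statement is the Claim_ definition above) =====
theorem rotate_pattern_spec : Claim_equal_rotate_pattern := by
  intro pattern rotation _
  unfold Spec_rotate_pattern rotate_pattern rotate_pattern_alt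
  by_cases h0 : rotation = 0
  · subst h0; simp [PySem.Int.floordiv]
  by_cases h90 : rotation = 90
  · subst h90
    simp [h0, PySem.Int.floordiv]
    norm_num [Function.iterate_succ_apply, pvQuarter]
  by_cases h180 : rotation = 180
  · subst h180
    simp [h0, PySem.Int.floordiv]
    norm_num [Function.iterate_succ_apply, pvQuarter_two]
  by_cases h270 : rotation = 270
  · subst h270
    simp [h0, PySem.Int.floordiv]
    norm_num [Function.iterate_succ_apply, pvQuarter_three]
  · simp [h0, h90, h180, h270]
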